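-- pv_equiv track=rewrite | github.com/kleinesMausi/Advent_Of_Code | 2025/Day3/lobby.py | get_joltage
-- ===== SOURCE A (Python) =====
-- def get_joltage(banks, max_batteries = 12):
--     banks = banks.strip().split("\n")
--     total = 0
--
--     for bank in banks:
--         amount_batteries = len(bank)
--
--         charges = []
--
--         for battery, battery_charge in enumerate(bank):
--
--             while charges and battery_charge > charges[-1] and len(charges) + (amount_batteries - battery) > max_batteries:
--                 charges.pop()
--
--             if len(charges) < max_batteries:
--                 charges.append(battery_charge)
--
--         result = int(''.join(charges))
--         total += result
--
--     return total
-- ===== SOURCE B (Python) =====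
-- def _best(bank, k):
--     # pick the k characters greedily: each step takes the maximum of the
--     # window that still leaves enough characters for the remaining picks
--     chosen = []
--     start = 0
--     for i in range(k, 0, -1):
--         window = bank[start:len(bank) - i + 1]
--         c = max(window)
--         chosen.append(c)
--         start += window.index(c) + 1
--     return chosen
--
--
-- def get_joltage(banks, max_batteries=12):
--     return sum(int(''.join(_best(bank, min(max_batteries, len(bank)))))
--                for bank in banks.strip().split("\n"))
-- ===== Notes on version B (the rewrite author's own statement) =====
-- stated objective: alternative
-- what changed: Per bank, A's single-pass monotonic stack (pop while a bigger charge can still replace the tail) is replaced by repeated window-maximum selection: for each of the k output positions, take the first maximum of the slice that still leaves room for the remaining picks.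
-- outside the precondition, e.g. on get_joltage('1+2', 2): A returns 12, B returns 12
import Mathlib
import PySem

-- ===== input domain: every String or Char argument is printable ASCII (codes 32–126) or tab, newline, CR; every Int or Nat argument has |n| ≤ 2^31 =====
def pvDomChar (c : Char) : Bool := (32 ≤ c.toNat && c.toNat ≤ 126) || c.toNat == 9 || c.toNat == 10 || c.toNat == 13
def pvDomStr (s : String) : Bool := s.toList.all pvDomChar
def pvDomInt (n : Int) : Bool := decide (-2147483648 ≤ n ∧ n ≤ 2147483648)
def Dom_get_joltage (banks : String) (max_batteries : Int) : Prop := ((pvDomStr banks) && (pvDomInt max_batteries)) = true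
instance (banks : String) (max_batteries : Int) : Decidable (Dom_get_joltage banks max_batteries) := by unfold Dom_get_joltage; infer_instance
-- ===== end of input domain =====

-- B replaces A's monotonic-stack pass per bank with repeated window-maximum selection (k scans); same return value.

-- ===== PORT A =====
-- the inner `while charges and battery_charge > charges[-1] and len(charges)+(amount-battery) > max_batteries: charges.pop()`
def popA (charges : List Char) (c : Char) (rem k : Int) : List Char :=
  if h : charges = [] then charges
  else if charges.getLast h < c ∧ k < (charges.length : Int) + rem then
    popA charges.dropLast c rem k
  else charges
termination_by charges.length
decreasing_by
  simpa [List.length_dropLast] using Nat.sub_lt (List.length_pos_of_ne_nil h) one_pos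

-- one iteration of `for battery, battery_charge in enumerate(bank)` (rem = amount_batteries - battery)
def stepA (k amount : Int) (charges : List Char) (bc : Int × Char) : List Char :=
  let charges' := popA charges bc.2 (amount - bc.1) k
  if (charges'.length : Int) < k then charges' ++ [bc.2] else charges'

-- one bank: `result = int(''.join(charges))`; .getD 0 totalizes the ValueError case, which Pre_ excludes
def bankA (k : Int) (bank : List Char) : Int :=
  (PySem.Int.ofChars? ((PySem.List.enumerate bank).foldl (stepA k (bank.length : Int)) [])).getD 0

def get_joltage (banks : String) (max_batteries : Int) : Int :=
  (PySem.Chars.splitOn (PySem.Chars.strip banks.toList) ['\n']).foldl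
    (fun total bank => total + bankA max_batteries bank) 0

-- ===== PORT B =====
-- the `for i in range(k, 0, -1)` selection loop of _best (window = bank[start:len(bank)-i+1])
def bestB (bank : List Char) (start i : Int) : List Char :=
  if h : 0 < i then
    let window := PySem.List.slice bank (some start) (some ((bank.length : Int) - i + 1))
    match PySem.List.max? window id with
    | none => []            -- max('') raises ValueError in Python; Pre_ excludes this, value irrelevant
    | some c =>
      match PySem.List.index? window c with
      | none => []          -- unreachable: the maximum is an element of the window
      | some j => c :: bestB bank (start + (j : Int) + 1) (i - 1)
  else []
termination_by i.toNat
decreasing_by omega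

-- `int(''.join(_best(bank, min(max_batteries, len(bank)))))`; .getD 0 totalizes the ValueError case
def bankB (k : Int) (bank : List Char) : Int :=
  (PySem.Int.ofChars? (bestB bank 0 (min k (bank.length : Int)))).getD 0

def get_joltage_alt (banks : String) (max_batteries : Int) : Int :=
  ((PySem.Chars.splitOn (PySem.Chars.strip banks.toList) ['\n']).map (bankB max_batteries)).sum

-- ===== PRECONDITION & SPEC =====
-- Pre_ requires max_batteries ≥ 1 and each line of the stripped input to be either a nonempty digit string or
-- an int()-parsable string no longer than max_batteries (then the whole line is kept): outside this, int() may
-- raise ValueError (empty selection, or selected non-digit characters), though on some such inputs the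
-- selection happens to drop the bad characters and A still returns a value that B matches.
def Pre_get_joltage (banks : String) (max_batteries : Int) : Prop :=
  1 ≤ max_batteries ∧
  ∀ line ∈ PySem.Chars.splitOn (PySem.Chars.strip banks.toList) ['\n'],
    PySem.Chars.strIsdigit line = true ∨
      (PySem.Int.ofChars? line ≠ none ∧ (line.length : Int) ≤ max_batteries)
instance (banks : String) (max_batteries : Int) : Decidable (Pre_get_joltage banks max_batteries) := by
  unfold Pre_get_joltage; infer_instance

def pvWitness_get_joltage : String × Int := ("987\n811111111\n234", 3)

def Spec_get_joltage (banks : String) (max_batteries : Int) (out : Int) : Prop := out = get_joltage_alt banks max_batteries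
instance (banks : String) (max_batteries : Int) (out : Int) : Decidable (Spec_get_joltage banks max_batteries out) := by unfold Spec_get_joltage; infer_instance

-- ===== CLAIM (what is proved, stated in full; the proofs are below) =====
def Claim_equal_get_joltage : Prop := ∀ (banks : String) (max_batteries : Int), Dom_get_joltage banks max_batteries → Pre_get_joltage banks max_batteries → Spec_get_joltage banks max_batteries (get_joltage banks max_batteries)

-- ===== LEMMAS AND PROOFS =====

-- reversed-stack view of A's pop loop (head = top of stack)
def popR (c : Char) (rem k : Int) : List Char → List Char
  | [] => []
  | x :: xs => if x < c ∧ k < (xs.length : Int) + 1 + rem then popR c rem k xs else x :: xs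

-- A's whole per-bank loop, rem expressed as the length of the unprocessed suffix, reversed stack
def procR (k : Int) (st : List Char) : List Char → List Char
  | [] => st
  | c :: t =>
    procR k
      (let st' := popR c ((t.length : Int) + 1) k st
       if (st'.length : Int) < k then c :: st' else st') t

-- B's greedy selection with a Nat budget, on the remaining suffix
def gsel (bank : List Char) : Nat → List Char
  | 0 => []
  | (i+1) =>
    match PySem.List.max? (bank.take (bank.length - i)) id with
    | none => []
    | some c =>
      match PySem.List.index? (bank.take (bank.length - i)) c with
      | none => []
      | some j => c :: gsel (bank.drop (j+1)) i

theorem popA_eq_popR (l : List Char) (c : Char) (rem k : Int) :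
    popA l.reverse c rem k = (popR c rem k l).reverse := by
  induction l with
  | nil => simp [popA, popR]
  | cons x xs ih =>
    rw [popR, List.reverse_cons, popA]
    have hne : xs.reverse ++ [x] ≠ [] := by simp
    rw [dif_neg hne]
    have hlast : (xs.reverse ++ [x]).getLast hne = x := by simp
    have hlen : ((xs.reverse ++ [x]).length : Int) = (xs.length : Int) + 1 := by simp
    rw [hlast, hlen]
    by_cases hc : x < c ∧ k < (xs.length : Int) + 1 + rem
    · rw [if_pos (by constructor <;> [exact hc.1; omega]), if_pos hc,
        List.dropLast_concat, ih]
    · rw [if_neg (by intro h; exact hc ⟨h.1, by omega⟩), if_neg hc, List.reverse_cons]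

theorem foldl_eq_procR (t : List Char) (s : Int) (st : List Char) (k amount : Int)
    (h : amount = s + t.length) :
    (PySem.List.enumerate t s).foldl (stepA k amount) st = (procR k st.reverse t).reverse := by
  induction t generalizing s st with
  | nil => simp [PySem.List.enumerate, procR]
  | cons c t ih =>
    rw [PySem.List.enumerate_cons, List.foldl_cons, procR]
    have hrem : amount - s = (t.length : Int) + 1 := by simp at h; omega
    have hpop : popA st c (amount - s) k = (popR c ((t.length : Int) + 1) k st.reverse).reverse := by
      rw [hrem, ← popA_eq_popR st.reverse c ((t.length : Int) + 1) k, List.reverse_reverse]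
    have hstep : stepA k amount st (s, c) =
        (if ((popR c ((t.length : Int) + 1) k st.reverse).length : Int) < k
         then c :: popR c ((t.length : Int) + 1) k st.reverse
         else popR c ((t.length : Int) + 1) k st.reverse).reverse := by
      unfold stepA
      simp only [hpop]
      by_cases hlen : ((popR c ((t.length : Int) + 1) k st.reverse).length : Int) < k
      · rw [if_pos (by simpa using hlen), if_pos hlen]; simp
      · rw [if_neg (by simpa using hlen), if_neg hlen]
    rw [hstep, ih (s + 1) _ (by simp at h ⊢; omega), List.reverse_reverse]

theorem mem_popR (c : Char) (rem k : Int) (st : List Char) (x : Char) (hx : x ∈ popR c rem k st) :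
    x ∈ st := by
  induction st with
  | nil => simp [popR] at hx
  | cons y ys ih =>
    rw [popR] at hx
    split_ifs at hx with h
    · exact List.mem_cons_of_mem _ (ih hx)
    · exact hx

theorem popR_drain (c : Char) (rem k : Int) (st : List Char)
    (hlt : ∀ x ∈ st, x < c) (hk : k ≤ rem) : popR c rem k st = [] := by
  induction st with
  | nil => rfl
  | cons y ys ih =>
    rw [popR, if_pos ⟨hlt y (List.mem_cons_self), by have := (ys.length : Int); omega⟩]
    exact ih (fun x hx => hlt x (List.mem_cons_of_mem _ hx))

theorem popR_bottom (d b : Char) (rem k : Int) (st : List Char)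
    (H : k ≤ rem → ¬ b < d) :
    popR d rem k (st ++ [b]) = popR d rem (k - 1) st ++ [b] := by
  induction st with
  | nil =>
    rw [List.nil_append, popR, popR, List.nil_append]
    by_cases hr : k ≤ rem
    · rw [if_neg (by intro h; exact H hr h.1)]
    · rw [if_neg (by intro h; simp at h; omega)]
  | cons y ys ih =>
    rw [List.cons_append, popR, popR]
    by_cases hc : y < d ∧ k - 1 < (ys.length : Int) + 1 + rem
    · rw [if_pos (by refine ⟨hc.1, ?_⟩; simp; omega), if_pos hc, ih]
    · rw [if_neg (by intro h; simp at h; exact hc ⟨h.1, by omega⟩), if_neg hc, List.cons_append]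

theorem procR_bottom (r : List Char) (st : List Char) (b : Char) (k : Int)
    (hle : ∀ (i : Nat) (h : i < r.length), (k : Int) ≤ (r.length : Int) - i → ¬ b < r[i]) :
    procR k (st ++ [b]) r = procR (k - 1) st r ++ [b] := by
  induction r generalizing st with
  | nil => rfl
  | cons d r ih =>
    rw [procR, procR]
    have hpop : popR d ((r.length : Int) + 1) k (st ++ [b])
        = popR d ((r.length : Int) + 1) (k - 1) st ++ [b] := by
      apply popR_bottom
      intro hr hbd
      exact hle 0 (by simp) (by simp; omega) hbd
    simp only [hpop]
    by_cases hlen : ((popR d ((r.length : Int) + 1) (k - 1) st).length : Int) < k - 1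
    · rw [if_pos (by simp; omega), if_pos hlen, ← List.cons_append]
      exact ih _ (fun i hi hki => hle (i + 1) (by simpa using hi)
        (by simp only [List.length_cons] at hki ⊢; push_cast at hki ⊢; omega))
    · rw [if_neg (by simp; omega), if_neg hlen]
      exact ih _ (fun i hi hki => hle (i + 1) (by simpa using hi)
        (by simp only [List.length_cons] at hki ⊢; push_cast at hki ⊢; omega))

theorem procR_prefix (p : List Char) (st : List Char) (c : Char) (r : List Char) (k : Int)
    (hk : 1 ≤ k) (hrem : (k : Int) ≤ (r.length : Int) + 1)
    (hst : ∀ x ∈ st, x < c) (hp : ∀ x ∈ p, x < c) :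
    procR k st (p ++ c :: r) = procR k [c] r := by
  induction p generalizing st with
  | nil =>
    rw [List.nil_append, procR]
    rw [popR_drain c _ k st hst hrem]
    rw [if_pos (by simpa using hk)]
  | cons a p ih =>
    rw [List.cons_append, procR]
    apply ih
    · intro x hx
      have ha : a < c := hp a List.mem_cons_self
      simp only [] at hx
      split_ifs at hx with hlen
      · rcases List.mem_cons.mp hx with h | h
        · exact h ▸ ha
        · exact hst x (mem_popR _ _ _ _ _ h)
      · exact hst x (mem_popR _ _ _ _ _ hx)
    · exact fun x hx => hp x (List.mem_cons_of_mem _ hx)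

theorem procR_nonpos (t : List Char) (k : Int) (hk : k ≤ 0) : procR k [] t = [] := by
  induction t with
  | nil => rfl
  | cons c t ih =>
    rw [procR]
    simp only [popR]
    rw [if_neg (by simp; omega)]
    exact ih

theorem procR_full (t : List Char) (st : List Char) (k : Int)
    (h : (st.length : Int) + t.length ≤ k) : procR k st t = t.reverse ++ st := by
  induction t generalizing st with
  | nil => simp [procR]
  | cons c t ih =>
    rw [procR]
    have hnopop : popR c ((t.length : Int) + 1) k st = st := by
      cases st with
      | nil => rfl
      | cons y ys => rw [popR, if_neg (by intro hh; simp at h; omega)]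
    simp only [hnopop]
    rw [if_pos (by simp at h; omega)]
    rw [ih (c :: st) (by simp at h ⊢; omega)]
    simp

theorem gsel_full (u : List Char) : gsel u u.length = u := by
  induction u with
  | nil => rfl
  | cons a t ih =>
    show gsel (a :: t) (t.length + 1) = a :: t
    rw [gsel]
    have htake : (a :: t).take ((a :: t).length - t.length) = [a] := by
      simp
    rw [htake]
    have hmax : PySem.List.max? [a] id = some a := rfl
    have hidx : PySem.List.index? [a] a = some 0 := by
      simp [PySem.List.index?_eq_idxOf?]
    simp only [hmax, hidx]
    simpa using ih

theorem max?_isSome_of_ne_nil (xs : List Char) (h : xs ≠ []) :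
    (PySem.List.max? xs id).isSome := by
  cases xs with
  | nil => exact absurd rfl h
  | cons a t =>
    clear h
    unfold PySem.List.max?
    rw [List.foldl_cons]
    induction t generalizing a with
    | nil => rfl
    | cons b t ih =>
      rw [List.foldl_cons]
      split <;> first | exact ih _ | skip
      all_goals
        split_ifs <;> exact ih _

-- the heart: A's stack pass equals B's greedy selection
theorem procR_eq_gsel : ∀ (n : Nat) (bank : List Char), bank.length = n → ∀ (k : Int),
    procR k [] bank = (gsel bank (min k.toNat bank.length)).reverse := by
  intro n
  induction n using Nat.strong_induction_on with
  | _ n IH =>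
    intro bank hn k
    by_cases hk0 : k ≤ 0
    · have ht : k.toNat = 0 := by omega
      rw [procR_nonpos bank k hk0, ht]
      simp [gsel]
    · rw [not_le] at hk0
      by_cases hkf : (bank.length : Int) ≤ k
      · rw [procR_full bank [] k (by simpa using hkf)]
        have hmin : min k.toNat bank.length = bank.length := by omega
        rw [hmin, gsel_full, List.append_nil]
      · -- 1 ≤ k < bank.length
        rw [not_le] at hkf
        obtain ⟨m', hm'⟩ : ∃ m', k.toNat = m' + 1 := ⟨k.toNat - 1, by omega⟩
        have hkm : k = (m' : Int) + 1 := by omega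
        have hmlt : m' + 1 < bank.length := by omega
        have hmin : min k.toNat bank.length = m' + 1 := by omega
        rw [hmin]
        -- the window and its maximum
        set w := bank.take (bank.length - m') with hw
        have hwlen : w.length = bank.length - m' := by
          rw [hw, List.length_take]; omega
        have hwne : w ≠ [] := by
          intro hnil; rw [hnil] at hwlen; simp at hwlen; omega
        obtain ⟨c, hc⟩ := Option.isSome_iff_exists.mp (max?_isSome_of_ne_nil w hwne)
        have hcmem : c ∈ w := PySem.List.max?_mem hc
        obtain ⟨j, hj⟩ := Option.isSome_iff_exists.mp
          ((PySem.List.index?_isSome_iff w c).mpr hcmem)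
        obtain ⟨pre, suf, hwdec, hprelen, hcpre⟩ :=
          (PySem.List.index?_eq_some_iff w c j).mp hj
        have hcle : ∀ y ∈ w, y ≤ c := fun y hy => PySem.List.max?_isMax hc y hy
        have hwdl := congrArg List.length hwdec
        simp only [List.length_append, List.length_cons] at hwdl
        have hjlt : j < w.length := by omega
        -- decompose the bank
        have hbank : bank = pre ++ c :: (suf ++ bank.drop w.length) := by
          conv_lhs => rw [← List.take_append_drop w.length bank]
          rw [show List.take w.length bank = w by rw [hwlen], hwdec]
          simp
        set r := suf ++ bank.drop w.length with hr
        have hsuflen : suf.length = w.length - j - 1 := by omega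
        have hrlen : r.length = bank.length - j - 1 := by
          rw [hr]
          simp only [List.length_append, List.length_drop]
          omega
        -- prefix: stack drains to [c]
        have hstep1 : procR k [] bank = procR k [c] r := by
          rw [hbank]
          exact procR_prefix pre [] c r k (by omega)
            (by rw [hrlen]; omega)
            (by intro x hx; simp at hx)
            (by intro x hx
                have hxw : x ∈ w := by rw [hwdec]; exact List.mem_append_left _ hx
                exact lt_of_le_of_ne (hcle x hxw) (fun he => hcpre (he ▸ hx)))
        -- bottom element c is inert
        have hstep2 : procR k [c] r = procR (k - 1) [] r ++ [c] := by
          have := procR_bottom r [] c k ?_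
          · simpa using this
          · intro i hi hki
            have hisuf : i < suf.length := by
              rw [hrlen] at hki; rw [hsuflen, hwlen]; omega
            have hget : r[i] = suf[i]'hisuf := List.getElem_append_left hisuf
            rw [hget]
            have hmem : suf[i] ∈ w := by
              rw [hwdec]
              exact List.mem_append_right _ (List.mem_cons_of_mem _ (List.getElem_mem _))
            exact not_lt.mpr (hcle _ hmem)
        -- recurse on the rest
        have hrec : procR (k - 1) [] r = (gsel r m').reverse := by
          have hrn : r.length < n := by omega
          have := IH r.length hrn r rfl (k - 1)
          rwa [show (k - 1).toNat = m' by omega,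
            show min m' r.length = m' by rw [hrlen]; omega] at this
        -- fold gsel one step
        have hgsel : gsel bank (m' + 1) = c :: gsel r m' := by
          rw [gsel, ← hw]
          simp only [hc, hj]
          congr 1
          rw [hbank, show pre ++ c :: r = (pre ++ [c]) ++ r by simp,
            List.drop_left' (by simp [hprelen])]
        rw [hstep1, hstep2, hrec, hgsel, List.reverse_cons]

theorem bestB_eq_gsel : ∀ (N : Nat) (bank : List Char) (start i : Int),
    i.toNat = N → 0 ≤ start → start ≤ (bank.length : Int) → i ≤ (bank.length : Int) - start →
    bestB bank start i = gsel (bank.drop start.toNat) i.toNat := by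
  intro N
  induction N using Nat.strong_induction_on with
  | _ N IH =>
    intro bank start i hN hs hsl hi
    by_cases hpos : 0 < i
    case neg =>
      rw [bestB, dif_neg hpos, show i.toNat = 0 by omega]
      rfl
    case pos =>
      rw [bestB, dif_pos hpos]
      obtain ⟨i', hi'⟩ : ∃ i', i.toNat = i' + 1 := ⟨i.toNat - 1, by omega⟩
      have hulen : (bank.drop start.toNat).length = bank.length - start.toNat :=
        List.length_drop
      have hwin : PySem.List.slice bank (some start) (some ((bank.length : Int) - i + 1))
          = (bank.drop start.toNat).take ((bank.drop start.toNat).length - i') := by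
        rw [show start = ((start.toNat : Nat) : Int) by omega,
          show (bank.length : Int) - i + 1 = ((bank.length - i' : Nat) : Int) by omega,
          PySem.List.slice_natCast]
        simp only [Int.toNat_natCast, List.length_drop]
        congr 1
        omega
      rw [hwin, hi', gsel]
      cases hmax : PySem.List.max?
          ((bank.drop start.toNat).take ((bank.drop start.toNat).length - i')) id with
      | none => simp only [hmax]
      | some c =>
        simp only [hmax]
        cases hidx : PySem.List.index?
            ((bank.drop start.toNat).take ((bank.drop start.toNat).length - i')) c with
        | none => rfl
        | some j =>
          simp only [hidx]
          obtain ⟨hjlt, -, -⟩ := PySem.List.getElem_of_index?_eq_some hidx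
          have hjlt' : j < (bank.drop start.toNat).length - i' := by
            simp only [List.length_take, lt_min_iff] at hjlt
            exact hjlt.1
          congr 1
          rw [IH (i - 1).toNat (by omega) bank (start + (j : Int) + 1) (i - 1) rfl
            (by omega) (by rw [hulen] at hjlt'; omega) (by rw [hulen] at hjlt'; omega)]
          rw [show (i - 1).toNat = i' by omega]
          congr 1
          rw [List.drop_drop]
          congr 1
          omega

theorem bank_eq (k : Int) (bank : List Char) : bankA k bank = bankB k bank := by
  unfold bankA bankB
  congr 2
  rw [foldl_eq_procR bank 0 [] k (bank.length : Int) (by simp), List.reverse_nil,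
    procR_eq_gsel bank.length bank rfl k, List.reverse_reverse,
    bestB_eq_gsel (min k (bank.length : Int)).toNat bank 0 (min k (bank.length : Int)) rfl
      (le_refl 0) (by omega) (by omega)]
  simp only [Int.toNat_zero, List.drop_zero]
  congr 1
  omega

-- ===== VERDICT (by name: the statement is the Claim_ definition above) =====
theorem get_joltage_spec : Claim_equal_get_joltage := by
  intro banks max_batteries _ _
  unfold Spec_get_joltage get_joltage get_joltage_alt
  rw [PySem.List.foldl_add (g := bankA max_batteries)]
  simp only [zero_add]
  congr 1
  exact List.map_congr_left (fun bank _ => bank_eq max_batteries bank)
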